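-- pv_equiv track=rewrite | github.com/GiannisFanourakis/CatalogLabel | src/services/export/pdf_exporter.py | _group_by_level1
-- ===== SOURCE A (Python) =====
-- from typing import Any, Dict, List, Optional, Tuple
--
-- def _group_by_level1(rows: List[Tuple[int, str, str]]) -> List[List[Tuple[int, str, str]]]:
--     """
--     Group rows into Level-1 blocks: [ (lvl1,...), (lvl2,...), ... ] until next lvl1.
--     If data doesn't start with lvl1, we treat it as one group.
--     """
--     groups: List[List[Tuple[int, str, str]]] = []
--     cur: List[Tuple[int, str, str]] = []
--
--     for r in rows:
--         lvl = int(r[0])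
--         if lvl == 1:
--             if cur:
--                 groups.append(cur)
--             cur = [r]
--         else:
--             if not cur:
--                 cur = []
--             cur.append(r)
--
--     if cur:
--         groups.append(cur)
--
--     if not groups:
--         return [rows]
--     return groups
-- ===== SOURCE B (Python) =====
-- from typing import List, Tuple
--
-- def _group_by_level1(rows: List[Tuple[int, str, str]]) -> List[List[Tuple[int, str, str]]]:
--     # Index-then-slice decomposition: each block is a head row plus the run
--     # of following rows whose level != 1, extracted by slicing.
--     if not rows:
--         return [rows]
--     out: List[List[Tuple[int, str, str]]] = []
--     i, n = 0, len(rows)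
--     while i < n:
--         j = i + 1
--         while j < n and int(rows[j][0]) != 1:
--             j += 1
--         out.append(rows[i:j])
--         i = j
--     return out
-- ===== Notes on version B (the rewrite author's own statement) =====
-- stated objective: alternative
-- what changed: Replaced A's single append-into-current-group accumulator pass with an index-then-slice decomposition: each block is the head row plus the scanned run of following non-level-1 rows.
import Mathlib
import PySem

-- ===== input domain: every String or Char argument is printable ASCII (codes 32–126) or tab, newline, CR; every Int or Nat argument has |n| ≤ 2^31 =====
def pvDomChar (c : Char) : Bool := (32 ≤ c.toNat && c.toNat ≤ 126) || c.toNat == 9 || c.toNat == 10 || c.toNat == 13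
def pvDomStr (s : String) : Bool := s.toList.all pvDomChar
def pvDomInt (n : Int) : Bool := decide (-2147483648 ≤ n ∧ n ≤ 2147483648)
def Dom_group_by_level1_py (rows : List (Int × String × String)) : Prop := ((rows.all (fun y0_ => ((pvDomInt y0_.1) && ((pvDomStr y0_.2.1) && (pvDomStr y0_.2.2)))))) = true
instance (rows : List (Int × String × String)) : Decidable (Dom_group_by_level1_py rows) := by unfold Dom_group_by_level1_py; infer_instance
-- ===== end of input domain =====

-- B groups by a different decomposition (index-then-slice: head row plus the run of non-level-1
-- rows, as a takeWhile/dropWhile recursion) instead of A's append-into-current-group pass;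
-- objective: alternative (same O(n) cost).

-- ===== PORT A =====
-- one step of A's for-loop, on state (groups, cur)
def pvAStep (st : List (List (Int × String × String)) × List (Int × String × String))
    (r : Int × String × String) : List (List (Int × String × String)) × List (Int × String × String) :=
  -- lvl = int(r[0]) : identity on an int
  if r.1 == 1 then
    (if st.2 ≠ [] then st.1 ++ [st.2] else st.1, [r])
  else
    -- 'if not cur: cur = []' is a no-op
    (st.1, st.2 ++ [r])

-- the trailing 'if cur: groups.append(cur)'
def pvAFin (st : List (List (Int × String × String)) × List (Int × String × String)) :
    List (List (Int × String × String)) :=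
  if st.2 ≠ [] then st.1 ++ [st.2] else st.1

def group_by_level1_py (rows : List (Int × String × String)) : List (List (Int × String × String)) :=
  let groups := pvAFin (rows.foldl pvAStep ([], []))
  if groups = [] then [rows] else groups

-- ===== PORT B =====
-- the outer while loop: one block = head row ++ run of rows with level ≠ 1 (the inner scan)
def pvBGo : List (Int × String × String) → List (List (Int × String × String))
  | [] => []
  | r :: rs =>
      (r :: rs.takeWhile (fun x => !(x.1 == 1))) :: pvBGo (rs.dropWhile (fun x => !(x.1 == 1)))
termination_by l => l.length
decreasing_by
  simpa using Nat.lt_succ_of_le (List.length_dropWhile_le _ _)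

def group_by_level1_py_alt (rows : List (Int × String × String)) : List (List (Int × String × String)) :=
  if rows = [] then [rows] else pvBGo rows

-- ===== PRECONDITION & SPEC =====
def Spec_group_by_level1_py (rows : List (Int × String × String)) (out : List (List (Int × String × String))) : Prop := out = group_by_level1_py_alt rows
instance (rows : List (Int × String × String)) (out : List (List (Int × String × String))) : Decidable (Spec_group_by_level1_py rows out) := by unfold Spec_group_by_level1_py; infer_instance

-- ===== CLAIM (what is proved, stated in full; the proofs are below) =====
def Claim_equal_group_by_level1_py : Prop := ∀ (rows : List (Int × String × String)), Dom_group_by_level1_py rows → Spec_group_by_level1_py rows (group_by_level1_py rows)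

-- ===== LEMMAS AND PROOFS =====

lemma pvBGo_cons (r : Int × String × String) (rs : List (Int × String × String)) :
    pvBGo (r :: rs) =
      (r :: rs.takeWhile (fun x => !(x.1 == 1))) :: pvBGo (rs.dropWhile (fun x => !(x.1 == 1))) := by
  rw [pvBGo.eq_def]

-- loop invariant for A: with a nonempty current group, finishing the fold yields the groups so
-- far, the current group extended with the run of non-level-1 rows, then B's blocks of the rest.
lemma pvA_loop (rows : List (Int × String × String))
    (groups : List (List (Int × String × String))) (cur : List (Int × String × String))
    (hcur : cur ≠ []) :
    pvAFin (rows.foldl pvAStep (groups, cur)) =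
      groups ++ [cur ++ rows.takeWhile (fun x => !(x.1 == 1))]
        ++ pvBGo (rows.dropWhile (fun x => !(x.1 == 1))) := by
  induction rows generalizing groups cur with
  | nil => simp [pvAFin, pvBGo, hcur]
  | cons r rs ih =>
      by_cases h1 : r.1 = 1
      · have hstep : pvAStep (groups, cur) r = (groups ++ [cur], [r]) := by
          simp [pvAStep, h1, hcur]
        rw [List.foldl_cons, hstep, ih _ _ (by simp)]
        rw [List.takeWhile_cons_of_neg (by simp [h1]), List.dropWhile_cons_of_neg (by simp [h1]),
          pvBGo_cons]
        simp
      · have hstep : pvAStep (groups, cur) r = (groups, cur ++ [r]) := by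
          simp [pvAStep, h1]
        rw [List.foldl_cons, hstep, ih _ _ (by simp [hcur])]
        simp [h1]

lemma pvA_eq_B (rows : List (Int × String × String)) :
    group_by_level1_py rows = group_by_level1_py_alt rows := by
  cases rows with
  | nil => rfl
  | cons r rs =>
      have hfirst : pvAStep ([], []) r = ([], [r]) := by
        by_cases h1 : r.1 = 1 <;> simp [pvAStep, h1]
      have h := pvA_loop rs [] [r] (by simp)
      rw [group_by_level1_py, group_by_level1_py_alt]
      simp only [List.foldl_cons, hfirst] at *
      rw [h, pvBGo_cons]
      simp

-- ===== VERDICT (by name: the statement is the Claim_ definition above) =====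
theorem group_by_level1_py_spec : Claim_equal_group_by_level1_py := by
  intro rows _
  exact pvA_eq_B rows
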